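-- pv_equiv track=rewrite | github.com/mildsalmon/CodingTest-Study | 1. PS/3. 프로그래머스/Level 2/해시/위장.py | solution
-- ===== SOURCE A (Python) =====
-- from itertools import combinations
--
-- def solution(clothes):
--     clothes_dict = {}
--     answer = 0
--     kind_len = 0
--
--     for name, kind in clothes:
--         if kind in clothes_dict:
--             clothes_dict[kind] += 1
--         else:
--             clothes_dict[kind] = 1
--         kind_len += 1
--
--     clothes_len_list = list(clothes_dict.values())
--
--     for i in range(1, kind_len + 1):
--         # 조합에서 시간초과가 발생했을 것이다.
--         # 만약, 옷의 종류가 30가지라면 $_{30}C_{15}$ (n=30, r=15인 조합)의 경우 155,117,520개가 발생하므로 시간초과가 당연하다.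
--         for combi in list(combinations(clothes_len_list, i)):
--             temp = combi[0]
--             for j in range(1, i):
--                 temp *= combi[j]
--             answer += temp
--
--     return answer
-- ===== SOURCE B (Python) =====
-- from collections import Counter
--
-- def solution(clothes):
--     answer = 1
--     for cnt in Counter(kind for _, kind in clothes).values():
--         answer *= cnt + 1
--     return answer - 1
-- ===== Notes on version B (the rewrite author's own statement) =====
-- stated objective: faster
-- what changed: Replaces the enumeration of all non-empty subsets of kind-counts (summing their products via itertools.combinations) with the closed form: product of (count_per_kind + 1) over kinds, minus 1.
import Mathlib
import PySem

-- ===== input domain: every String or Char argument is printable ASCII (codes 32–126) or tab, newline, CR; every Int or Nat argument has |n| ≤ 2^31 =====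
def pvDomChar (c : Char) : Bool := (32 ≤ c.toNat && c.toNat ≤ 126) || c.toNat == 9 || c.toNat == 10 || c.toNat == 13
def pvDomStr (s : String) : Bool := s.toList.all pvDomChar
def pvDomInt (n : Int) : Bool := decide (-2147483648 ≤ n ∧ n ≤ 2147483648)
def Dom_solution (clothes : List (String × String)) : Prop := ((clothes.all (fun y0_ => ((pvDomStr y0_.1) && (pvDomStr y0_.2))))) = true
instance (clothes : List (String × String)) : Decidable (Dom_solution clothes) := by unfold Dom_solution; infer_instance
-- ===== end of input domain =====

-- ===== PORT A =====
-- B changes: closed form ∏(count_per_kind+1)-1 instead of summing products over all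
-- combinations of kind-counts (asymptotically faster; exact same return value).
def solution (clothes : List (String × String)) : Int :=
  let st := clothes.foldl
    (fun (acc : PySem.Dict String Int × Int) p =>
      if acc.1.contains p.2 then (acc.1.insert p.2 (acc.1.getD p.2 0 + 1), acc.2 + 1)
      else (acc.1.insert p.2 1, acc.2 + 1))
    (PySem.Dict.empty, 0)
  let clothesLenList := st.1.values
  let kindLen := st.2
  (PySem.List.pyRange 1 (kindLen + 1) 1).foldl
    (fun answer i =>
      (PySem.List.combinations clothesLenList i.toNat).foldl
        (fun answer combi =>
          -- combi[0] / combi[j]: indices are always in range (combi has length i ≥ 1)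
          let temp := PySem.List.pyGetD combi 0 0
          let temp := (PySem.List.pyRange 1 i 1).foldl
            (fun t j => t * PySem.List.pyGetD combi j 0) temp
          answer + temp)
        answer)
    0

-- ===== PORT B =====
def solution_alt (clothes : List (String × String)) : Int :=
  ((PySem.Dict.counter (clothes.map (·.2))).values.foldl (fun a c => a * (c + 1)) 1) - 1

-- ===== PRECONDITION & SPEC =====
def Spec_solution (clothes : List (String × String)) (out : Int) : Prop := out = solution_alt clothes
instance (clothes : List (String × String)) (out : Int) : Decidable (Spec_solution clothes out) := by unfold Spec_solution; infer_instance

-- ===== CLAIM (what is proved, stated in full; the proofs are below) =====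
def Claim_equal_solution : Prop := ∀ (clothes : List (String × String)), Dom_solution clothes → Spec_solution clothes (solution clothes)

-- ===== LEMMAS AND PROOFS =====

-- A's counting loop: the pair accumulator splits; the dict component is Counter(kinds)
theorem pvFoldA_fst (l : List (String × String)) (d : PySem.Dict String Int) (n : Int) :
    (l.foldl (fun (acc : PySem.Dict String Int × Int) p =>
      if acc.1.contains p.2 then (acc.1.insert p.2 (acc.1.getD p.2 0 + 1), acc.2 + 1)
      else (acc.1.insert p.2 1, acc.2 + 1)) (d, n)).1
    = l.foldl (fun d p => d.insert p.2 (d.getD p.2 0 + 1)) d := by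
  induction l generalizing d n with
  | nil => rfl
  | cons p l ih =>
      simp only [List.foldl_cons]
      by_cases h : d.contains p.2 = true
      · simp [h, ih]
      · simp only [Bool.not_eq_true] at h
        have h0 := PySem.Dict.getD_of_not_contains d (0 : Int) h
        simp [h, ih, h0]

theorem pvFoldA_snd (l : List (String × String)) (d : PySem.Dict String Int) (n : Int) :
    (l.foldl (fun (acc : PySem.Dict String Int × Int) p =>
      if acc.1.contains p.2 then (acc.1.insert p.2 (acc.1.getD p.2 0 + 1), acc.2 + 1)
      else (acc.1.insert p.2 1, acc.2 + 1)) (d, n)).2 = n + l.length := by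
  induction l generalizing d n with
  | nil => simp
  | cons p l ih =>
      simp only [List.foldl_cons]
      by_cases h : d.contains p.2 = true <;> simp [h, ih] <;> omega

theorem pvDictA_eq_counter (clothes : List (String × String)) :
    (clothes.foldl (fun (acc : PySem.Dict String Int × Int) p =>
      if acc.1.contains p.2 then (acc.1.insert p.2 (acc.1.getD p.2 0 + 1), acc.2 + 1)
      else (acc.1.insert p.2 1, acc.2 + 1)) (PySem.Dict.empty, 0)).1
    = PySem.Dict.counter (clothes.map (·.2)) := by
  rw [pvFoldA_fst, ← PySem.Dict.foldl_insert_getD_add_one_eq_counter, List.foldl_map]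

-- sum of products over all r-combinations
def pvS (l : List Int) (r : Nat) : Int := ((PySem.List.combinations l r).map List.prod).sum

theorem pvS_zero (l : List Int) : pvS l 0 = 1 := by
  simp [pvS, PySem.List.combinations_zero]

theorem pvS_succ (x : Int) (xs : List Int) (r : Nat) :
    pvS (x :: xs) (r + 1) = x * pvS xs r + pvS xs (r + 1) := by
  simp [pvS, PySem.List.combinations_cons_succ, List.map_map, Function.comp_def,
    List.sum_map_mul_left]

theorem pvS_of_lt (l : List Int) (r : Nat) (h : l.length < r) : pvS l r = 0 := by
  simp [pvS, PySem.List.combinations_eq_nil_of_length_lt l h]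

theorem pvSum_S (l : List Int) (N : Nat) (h : l.length ≤ N) :
    ∑ i ∈ Finset.range (N + 1), pvS l i = (l.map (· + 1)).prod := by
  induction l generalizing N with
  | nil =>
      have : ∀ i ∈ Finset.range (N + 1), pvS [] i = if i = 0 then 1 else 0 := by
        intro i _
        cases i with
        | zero => simp [pvS_zero]
        | succ k => simp [pvS_of_lt [] (k+1) (by simp)]
      rw [Finset.sum_congr rfl this, Finset.sum_ite_eq' (Finset.range (N+1)) 0 (fun _ => (1:Int))]
      simp
  | cons x xs ih =>
      obtain ⟨M, rfl⟩ : ∃ M, N = M + 1 := ⟨N - 1, by simp at h; omega⟩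
      have hM : xs.length ≤ M := by simp at h; omega
      rw [Finset.sum_range_succ' (fun i => pvS (x :: xs) i)]
      have hstep : ∀ i ∈ Finset.range (M + 1), pvS (x :: xs) (i + 1)
          = x * pvS xs i + pvS xs (i + 1) := fun i _ => pvS_succ x xs i
      rw [Finset.sum_congr rfl hstep, Finset.sum_add_distrib, ← Finset.mul_sum,
        ih M hM, pvS_zero]
      have h2 : ∑ i ∈ Finset.range (M + 1), pvS xs (i + 1)
          = (∑ i ∈ Finset.range (M + 2), pvS xs i) - pvS xs 0 := by
        rw [Finset.sum_range_succ' (fun i => pvS xs i)]; ring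
      rw [h2, ih (M + 1) (by omega), pvS_zero]
      simp [List.prod_cons]; ring

-- the inner index loop computes the product of the combination
theorem pvFoldl_mul (xs : List Int) (a : Int) : xs.foldl (· * ·) a = a * xs.prod := by
  induction xs generalizing a with
  | nil => simp
  | cons y ys ih => simp [List.foldl_cons, ih, List.prod_cons]; ring

theorem pvInner_eq_prod (combi : List Int) (i : Int) (h1 : 1 ≤ i)
    (hlen : combi.length = i.toNat) :
    (PySem.List.pyRange 1 i 1).foldl (fun t j => t * PySem.List.pyGetD combi j 0)
      (PySem.List.pyGetD combi 0 0) = combi.prod := by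
  have hi : i = (combi.length : Int) := by omega
  subst hi
  cases combi with
  | nil => simp at h1
  | cons x xs =>
      rw [PySem.List.foldl_pyRange_pyGetD' (x :: xs) 0 (fun t v => t * v)
        (PySem.List.pyGetD (x :: xs) 0 0) (by omega)]
      simp [PySem.List.pyGetD_zero_cons, pvFoldl_mul, List.prod_cons]

-- B's loop is the product of (count + 1)
theorem pvFoldB (l : List Int) (a : Int) :
    l.foldl (fun a c => a * (c + 1)) a = a * (l.map (· + 1)).prod := by
  induction l generalizing a with
  | nil => simp
  | cons y ys ih => simp [List.foldl_cons, ih]; ring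

-- list-sum over range ↦ Finset sum
theorem pvSum_map_range (f : Nat → Int) (n : Nat) :
    ((List.range n).map f).sum = ∑ i ∈ Finset.range n, f i := by
  induction n with
  | zero => simp
  | succ m ih => rw [List.range_succ, Finset.sum_range_succ, List.map_append, List.sum_append]
                 simp [ih]

-- ===== VERDICT (by name: the statement is the Claim_ definition above) =====
theorem solution_spec : Claim_equal_solution := by
  intro clothes _
  unfold Spec_solution
  simp only [solution, solution_alt]
  rw [pvDictA_eq_counter, pvFoldA_snd]
  set ks := clothes.map (·.2) with hks
  set vals := (PySem.Dict.counter ks).values with hvals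
  have hvlen : vals.length ≤ clothes.length := by
    have h1 : vals.length = (PySem.Dict.counter ks).keys.length := by
      simp [hvals, PySem.Dict.values, PySem.Dict.keys]
    rw [h1, PySem.Dict.keys_counter]
    calc (PySem.Set.ofList ks).length ≤ ks.length := PySem.Set.length_ofList_le ks
      _ = clothes.length := by simp [hks]
  -- collapse the nested folds into a double sum
  have houter : ∀ (rng : List Int) (a : Int), (∀ i ∈ rng, 1 ≤ i) →
      rng.foldl (fun answer i =>
        (PySem.List.combinations vals i.toNat).foldl
          (fun answer combi =>
            answer + (PySem.List.pyRange 1 i 1).foldl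
              (fun t j => t * PySem.List.pyGetD combi j 0)
              (PySem.List.pyGetD combi 0 0)) answer) a
      = a + (rng.map (fun i => pvS vals i.toNat)).sum := by
    intro rng
    induction rng with
    | nil => simp
    | cons i rng ih =>
        intro a hmem
        have hi : 1 ≤ i := hmem i (by simp)
        rw [List.foldl_cons, ih _ (fun j hj => hmem j (by simp [hj]))]
        have hinner : (PySem.List.combinations vals i.toNat).foldl
            (fun answer combi =>
              answer + (PySem.List.pyRange 1 i 1).foldl
                (fun t j => t * PySem.List.pyGetD combi j 0)
                (PySem.List.pyGetD combi 0 0)) a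
            = a + pvS vals i.toNat := by
          rw [PySem.List.foldl_add]
          congr 1
          unfold pvS
          congr 1
          apply List.map_congr_left
          intro c hc
          exact pvInner_eq_prod c i hi (PySem.List.length_of_mem_combinations hc)
        rw [hinner]
        simp [List.map_cons, List.sum_cons]; ring
  have hrange : ∀ i ∈ PySem.List.pyRange 1 ((0 : Int) + clothes.length + 1) 1, 1 ≤ i := by
    intro i hi
    exact ((PySem.List.mem_pyRange_one).1 hi).1
  rw [houter _ 0 hrange, PySem.List.pyRange_one]
  have hcast : (((0 : Int) + clothes.length + 1) - 1).toNat = clothes.length := by omega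
  rw [hcast, List.map_map]
  have hfun : ((fun i => pvS vals i.toNat) ∘ fun k : Nat => (1 : Int) + k)
      = fun k : Nat => pvS vals (k + 1) := by
    funext k
    simp [Function.comp]
    congr 1
    omega
  rw [hfun, pvSum_map_range]
  have := pvSum_S vals clothes.length hvlen
  rw [Finset.sum_range_succ' (fun i => pvS vals i)] at this
  rw [pvS_zero] at this
  rw [pvFoldB]
  omega
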